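-- pv_equiv track=rewrite | github.com/haolunc/ARC-RL | reference_solutions/solutions/49d1d64f.py | transform
-- ===== SOURCE A (Python) =====
-- def transform(grid):
--     if not grid or not grid[0]:
--         return []
--     r, c = len(grid), len(grid[0])
--     out = [[0] * (c + 2) for _ in range(r + 2)]
--
--     for i in range(r):
--         for j in range(c):
--             out[i + 1][j + 1] = grid[i][j]
--
--     for j in range(c):
--         out[0][j + 1] = grid[0][j]
--         out[r + 1][j + 1] = grid[r - 1][j]
--
--     for i in range(r):
--         out[i + 1][0] = grid[i][0]
--         out[i + 1][c + 1] = grid[i][c - 1]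
--
--     return out
-- ===== SOURCE B (Python) =====
-- def transform(grid):
--     if not grid or not grid[0]:
--         return []
--     r, c = len(grid), len(grid[0])
--
--     def cell(i, j):
--         if i in (0, r + 1) and j in (0, c + 1):
--             return 0
--         return grid[min(max(i - 1, 0), r - 1)][min(max(j - 1, 0), c - 1)]
--
--     return [[cell(i, j) for j in range(c + 2)] for i in range(r + 2)]
-- ===== Notes on version B (the rewrite author's own statement) =====
-- stated objective: alternative
-- what changed: B computes every output cell independently from its coordinates by a closed-form clamped index map out[i][j] = grid[clamp(i-1,0,r-1)][clamp(j-1,0,c-1)] with 0 at the four corners, in one 2-D comprehension, instead of A's preallocated zero matrix mutated by three separate index-assignment passes (interior, top/bottom edge, left/right edge).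
import Mathlib
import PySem

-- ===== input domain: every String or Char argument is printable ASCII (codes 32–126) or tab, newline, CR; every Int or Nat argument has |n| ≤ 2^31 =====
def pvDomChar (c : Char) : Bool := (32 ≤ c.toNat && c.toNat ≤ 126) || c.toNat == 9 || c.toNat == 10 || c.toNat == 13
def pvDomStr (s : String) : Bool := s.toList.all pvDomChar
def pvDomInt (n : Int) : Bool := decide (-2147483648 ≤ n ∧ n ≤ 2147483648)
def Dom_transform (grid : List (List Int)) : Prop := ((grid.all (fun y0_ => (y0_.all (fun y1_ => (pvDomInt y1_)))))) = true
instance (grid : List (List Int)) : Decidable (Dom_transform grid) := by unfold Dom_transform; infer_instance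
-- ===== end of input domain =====

-- B computes each output cell by a closed-form clamped index map over a single 2-D comprehension
-- instead of A's preallocated zero matrix mutated by three index-assignment passes; same cost.

-- ===== PORT A =====
-- out[i][j] read/write with nonnegative in-range indices; getD/set are exact there
-- (Pre_transform keeps every read of grid in range, matching where Python A returns).
def pvGet2 (g : List (List Int)) (i j : Nat) : Int := (g.getD i []).getD j 0

def pvSet2 (o : List (List Int)) (i j : Nat) (v : Int) : List (List Int) :=
  o.set i ((o.getD i []).set j v)

def transform (grid : List (List Int)) : List (List Int) :=
  if grid = [] ∨ grid.headD [] = [] then []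
  else
    let r := grid.length
    let c := (grid.headD []).length
    -- out = [[0]*(c+2) for _ in range(r+2)]
    let out0 := List.replicate (r+2) (List.replicate (c+2) (0:Int))
    -- interior pass
    let out1 := (List.range r).foldl (fun o i =>
        (List.range c).foldl (fun o2 j => pvSet2 o2 (i+1) (j+1) (pvGet2 grid i j)) o) out0
    -- top/bottom edge pass
    let out2 := (List.range c).foldl (fun o j =>
        pvSet2 (pvSet2 o 0 (j+1) (pvGet2 grid 0 j)) (r+1) (j+1) (pvGet2 grid (r-1) j)) out1
    -- left/right edge pass
    let out3 := (List.range r).foldl (fun o i =>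
        pvSet2 (pvSet2 o (i+1) 0 (pvGet2 grid i 0)) (i+1) (c+1) (pvGet2 grid i (c-1))) out2
    out3

-- ===== PORT B =====
-- cell(i, j): 0 at the four corners, otherwise grid[min(max(i-1,0),r-1)][min(max(j-1,0),c-1)];
-- indices are in range on Pre_, where getD is exact.
def transform_alt (grid : List (List Int)) : List (List Int) :=
  if grid = [] ∨ grid.headD [] = [] then []
  else
    let r := grid.length
    let c := (grid.headD []).length
    (List.range (r+2)).map (fun i => (List.range (c+2)).map (fun j =>
      if (i = 0 ∨ i = r + 1) ∧ (j = 0 ∨ j = c + 1) then (0:Int)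
      else ((grid.getD (min (max (i-1) 0) (r-1)) []).getD (min (max (j-1) 0) (c-1)) 0)))

-- ===== PRECONDITION & SPEC =====
-- Pre_ excludes exactly the ragged grids on which Python A raises IndexError
-- (some row shorter than the nonempty first row); A returns on every other input.
def Pre_transform (grid : List (List Int)) : Prop :=
  ∀ row ∈ grid, (grid.headD []).length ≤ row.length
instance (grid : List (List Int)) : Decidable (Pre_transform grid) := by unfold Pre_transform; infer_instance

def pvWitness_transform : List (List Int) := [[1, 2], [3, 4], [5, 6]]

def Spec_transform (grid : List (List Int)) (out : List (List Int)) : Prop := out = transform_alt grid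
instance (grid : List (List Int)) (out : List (List Int)) : Decidable (Spec_transform grid out) := by unfold Spec_transform; infer_instance

-- ===== CLAIM (what is proved, stated in full; the proofs are below) =====
def Claim_equal_transform : Prop := ∀ (grid : List (List Int)), Dom_transform grid → Pre_transform grid → Spec_transform grid (transform grid)

-- ===== LEMMAS AND PROOFS =====

-- proof-side canonical form both ports are reduced to: padded rows written out explicitly
def pvPad (c : Nat) (l : Int) (row : List Int) (r : Int) : List Int := l :: (row.take c ++ [r])

def pvCanon (grid : List (List Int)) : List (List Int) :=
  if grid = [] ∨ grid.headD [] = [] then []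
  else
    let c := (grid.headD []).length
    pvPad c 0 (grid.headD []) 0 ::
      (grid.map (fun row => pvPad c (row.headD 0) row (row.getD (c-1) 0))
        ++ [pvPad c 0 (grid.getLastD []) 0])

-- getD of set at the same in-range index
lemma pv_getD_set_self {α : Type} (l : List α) (n : Nat) (h : n < l.length) (a d : α) :
    (l.set n a).getD n d = a := by
  simp [List.getD_eq_getElem?_getD, h]

-- a fold that repeatedly writes rows at positions i+1 of a cons leaves the head alone
lemma pv_foldl_shift {α : Type} (d : α) (g : Nat → α → α) (r : Nat) (t : α) (rest : List α) :
    (List.range r).foldl (fun o i => o.set (i+1) (g i (o.getD (i+1) d))) (t :: rest)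
    = t :: (List.range r).foldl (fun o i => o.set i (g i (o.getD i d))) rest := by
  induction r with
  | zero => simp
  | succ n ih =>
    rw [List.range_succ, List.foldl_append, List.foldl_append, ih]
    simp

-- writing position i with a function of the current entry, for i = 0..r-1: a prefix mapIdx
lemma pv_foldl_set_take {α : Type} (d : α) (g : Nat → α → α) :
    ∀ (r : Nat) (m : List α), r ≤ m.length →
    (List.range r).foldl (fun o i => o.set i (g i (o.getD i d))) m
    = (m.take r).mapIdx g ++ m.drop r
  | 0, m, _ => by simp
  | (r+1), m, h => by
    have hr : r < m.length := h
    have hlen : ((m.take r).mapIdx g).length = r := by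
      simp [List.length_take]; omega
    rw [List.range_succ, List.foldl_append, pv_foldl_set_take d g r m (le_of_lt hr)]
    simp only [List.foldl_cons, List.foldl_nil]
    rw [List.getD_append_right _ _ _ _ (le_of_eq hlen), hlen, Nat.sub_self,
        List.set_append_right _ _ (le_of_eq hlen), hlen, Nat.sub_self,
        List.take_succ_eq_append_getElem hr, List.mapIdx_append]
    rw [List.drop_eq_getElem_cons hr]
    simp only [List.set_cons_zero, List.getD_cons_zero, List.mapIdx_cons, List.mapIdx_nil,
      List.length_take, Nat.min_eq_left (le_of_lt hr), Nat.zero_add, List.append_assoc,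
      List.cons_append, List.nil_append]

-- two pvSet2 writes into the same row collapse into one row update
lemma pv_pvSet2_pvSet2_same (o : List (List Int)) (i j1 j2 : Nat) (a b : Int) :
    pvSet2 (pvSet2 o i j1 a) i j2 b = o.set i (((o.getD i []).set j1 a).set j2 b) := by
  unfold pvSet2
  by_cases h : i < o.length
  · rw [pv_getD_set_self _ _ h, List.set_set]
  · have h' := Nat.le_of_not_lt h
    rw [List.set_eq_of_length_le h', List.set_eq_of_length_le h', List.set_eq_of_length_le h']

-- a fold of pvSet2 writes all into row k is one row update
lemma pv_foldl_pvSet2_row (k : Nat) (f : Nat → Nat) (v : Nat → Int) :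
    ∀ (js : List Nat) (o : List (List Int)),
    js.foldl (fun o2 j => pvSet2 o2 k (f j) (v j)) o
    = o.set k (js.foldl (fun row j => row.set (f j) (v j)) (o.getD k []))
  | [], o => by
    simp only [List.foldl_nil]
    by_cases h : k < o.length
    · rw [List.getD_eq_getElem _ _ h, List.set_getElem_self]
    · rw [List.set_eq_of_length_le (Nat.le_of_not_lt h)]
  | j :: js, o => by
    simp only [List.foldl_cons]
    rw [pv_foldl_pvSet2_row k f v js (pvSet2 o k (f j) (v j))]
    unfold pvSet2
    by_cases h : k < o.length
    · rw [pv_getD_set_self _ _ h, List.set_set]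
    · have h' := Nat.le_of_not_lt h
      rw [List.set_eq_of_length_le h', List.set_eq_of_length_le h', List.set_eq_of_length_le h']

-- 1-D: writing constants v j at positions j+1 for j = 0..cnt-1
lemma pv_foldl_set_const {α : Type} (v : Nat → α) (cnt : Nat) (t : α) (rest : List α)
    (h : cnt ≤ rest.length) :
    (List.range cnt).foldl (fun ro j => ro.set (j+1) (v j)) (t :: rest)
    = t :: ((List.range cnt).map v ++ rest.drop cnt) := by
  have h1 : (List.range cnt).foldl (fun ro j => ro.set (j+1) ((fun i (_ : α) => v i) j (ro.getD (j+1) t))) (t :: rest)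
      = t :: (List.range cnt).foldl (fun ro j => ro.set j ((fun i (_ : α) => v i) j (ro.getD j t))) rest :=
    pv_foldl_shift t (fun i _ => v i) cnt t rest
  simp only [] at h1
  rw [h1, pv_foldl_set_take t (fun i _ => v i) cnt rest h]
  congr 1
  congr 1
  apply List.ext_getElem
  · simp [List.length_take]; omega
  · intro i h1 h2
    simp [List.getElem_mapIdx]

-- mapIdx with a function ignoring the entry, over a map of range
lemma pv_mapIdx_map_range {α : Type} (g : Nat → α → α) (f : Nat → α) (r : Nat) :
    ((List.range r).map f).mapIdx g = (List.range r).map (fun i => g i (f i)) := by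
  apply List.ext_getElem
  · simp
  · intro i h1 h2
    simp [List.getElem_mapIdx]

-- mapIdx over a replicate: a map over the index range
lemma pv_mapIdx_replicate {α : Type} (g : Nat → α → α) (n : Nat) (z : α) :
    (List.replicate n z).mapIdx g = (List.range n).map (fun i => g i z) := by
  apply List.ext_getElem
  · simp
  · intro i h1 h2
    simp [List.getElem_mapIdx]

-- replacing the last element of xs ++ [y]
lemma pv_set_append_last {α : Type} (xs : List α) (y x : α) :
    (xs ++ [y]).set xs.length x = xs ++ [x] := by
  rw [List.set_append_right _ _ (le_refl _)]
  simp

lemma pv_getD_append_last {α : Type} (xs : List α) (y d : α) :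
    (xs ++ [y]).getD xs.length d = y := by
  rw [List.getD_append_right _ _ _ _ (le_refl _)]
  simp

-- the top/bottom edge pass only touches the first and last row
lemma pv_foldl_topbot (tv bv : Nat → Int) (r : Nat) :
    ∀ (js : List Nat) (t b : List Int) (mid : List (List Int)), mid.length = r →
    js.foldl (fun o j => pvSet2 (pvSet2 o 0 (j+1) (tv j)) (r+1) (j+1) (bv j)) (t :: (mid ++ [b]))
    = (js.foldl (fun ro j => ro.set (j+1) (tv j)) t) :: (mid
        ++ [js.foldl (fun ro j => ro.set (j+1) (bv j)) b])
  | [], t, b, mid, hm => by simp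
  | j :: js, t, b, mid, hm => by
    simp only [List.foldl_cons]
    have h1 : pvSet2 (t :: (mid ++ [b])) 0 (j+1) (tv j) = (t.set (j+1) (tv j)) :: (mid ++ [b]) := by
      unfold pvSet2; simp
    have h2 : pvSet2 ((t.set (j+1) (tv j)) :: (mid ++ [b])) (r+1) (j+1) (bv j)
        = (t.set (j+1) (tv j)) :: (mid ++ [b.set (j+1) (bv j)]) := by
      unfold pvSet2
      rw [show (r:Nat)+1 = mid.length+1 by omega]
      simp only [List.getD_cons_succ, List.set_cons_succ, pv_getD_append_last,
        pv_set_append_last]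
    rw [h1, h2, pv_foldl_topbot tv bv r js _ _ mid hm]

-- replicate (n+2) split as head :: middle ++ [last]
lemma pv_replicate_split {α : Type} (n : Nat) (z : α) :
    List.replicate (n + 2) z = z :: (List.replicate n z ++ [z]) := by
  rw [show n + 2 = (n+1)+1 from rfl, List.replicate_succ, List.replicate_succ']

-- composite: a pass that rewrites rows 1..r of t :: mid ++ [b] in place
lemma pv_foldl_rows {α : Type} (d : α) (g : Nat → α → α) (r : Nat) (t b : α) (mid : List α)
    (hm : mid.length = r) :
    (List.range r).foldl (fun o i => o.set (i+1) (g i (o.getD (i+1) d))) (t :: (mid ++ [b]))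
    = t :: (mid.mapIdx g ++ [b]) := by
  rw [pv_foldl_shift, pv_foldl_set_take d g r (mid ++ [b]) (by simp [hm]),
      List.take_left' hm, List.drop_left' hm]

-- map of getD over range = take (rectangular rows)
lemma pv_map_getD_range (row : List Int) (c : Nat) (h : c ≤ row.length) :
    (List.range c).map (fun j => row.getD j 0) = row.take c := by
  apply List.ext_getElem
  · simp [List.length_take, Nat.min_eq_left h]
  · intro i h1 h2
    have hic : i < c := by simpa using h1
    have hir : i < row.length := by omega
    simp [List.getD_eq_getElem?_getD, List.getElem?_eq_getElem hir]

-- map over range of length = map over the list itself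
lemma pv_map_range_getD {α β : Type} (F : α → β) (d : α) (l : List α) :
    (List.range l.length).map (fun i => F (l.getD i d)) = l.map F := by
  apply List.ext_getElem
  · simp
  · intro i h1 h2
    have hil : i < l.length := by simpa using h1
    simp [List.getD_eq_getElem?_getD, List.getElem?_eq_getElem hil]

lemma pv_getD_zero_headD {α : Type} (l : List α) (d : α) : l.getD 0 d = l.headD d := by
  cases l <;> simp

lemma pv_getLastD_cons {α : Type} (x : α) (xs : List α) (d : α) :
    (x :: xs).getLastD d = (x :: xs).getD xs.length d := by
  rw [List.getD_eq_getElem _ _ (by simp)]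
  rw [List.getLastD_eq_getLast?, List.getLast?_eq_getElem?]
  simp

-- map over range (n+2) split into first, middle and last element
lemma pv_map_range_two {α : Type} (f : Nat → α) (n : Nat) :
    (List.range (n+2)).map f = f 0 :: ((List.range n).map (fun k => f (k+1)) ++ [f (n+1)]) := by
  rw [show n+2 = (n+1)+1 from rfl, List.range_succ, List.map_append, List.range_succ_eq_map]
  simp [Function.comp]

-- A reduced to the canonical row form
lemma pv_transform_eq_canon (grid : List (List Int)) (hpre : Pre_transform grid) :
    transform grid = pvCanon grid := by
  by_cases hg : grid = [] ∨ grid.headD [] = []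
  · simp only [transform, pvCanon, if_pos hg]
  · obtain ⟨g0, gs, rfl⟩ : ∃ g0 gs, grid = g0 :: gs := by
      cases grid with
      | nil => exact absurd (Or.inl rfl) hg
      | cons a l => exact ⟨a, l, rfl⟩
    simp only [transform, pvCanon]
    rw [if_neg hg, if_neg hg]
    simp only [List.headD_cons, List.length_cons, Nat.add_sub_cancel]
    have hrow : ∀ (v : Nat → Int),
        List.foldl (fun row j => row.set (j+1) (v j)) (List.replicate (g0.length + 2) (0:Int))
          (List.range g0.length)
        = 0 :: ((List.range g0.length).map v ++ [0]) := by
      intro v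
      rw [pv_replicate_split g0.length (0:Int), pv_foldl_set_const v g0.length 0 _ (by simp)]
      simp
    -- ===== pass 1: interior =====
    have hf1 : (fun (o : List (List Int)) (i : Nat) =>
          List.foldl (fun o2 j => pvSet2 o2 (i + 1) (j + 1) (pvGet2 (g0 :: gs) i j)) o
            (List.range g0.length))
        = (fun o i => o.set (i+1)
            (List.foldl (fun row j => row.set (j+1) (pvGet2 (g0 :: gs) i j))
              (o.getD (i+1) []) (List.range g0.length))) := by
      funext o i
      exact pv_foldl_pvSet2_row (i+1) (fun j => j+1) (fun j => pvGet2 (g0 :: gs) i j)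
        (List.range g0.length) o
    rw [hf1, pv_replicate_split (gs.length + 1) (List.replicate (g0.length + 2) (0:Int)),
        pv_foldl_rows ([] : List Int)
          (fun i row => List.foldl (fun row j => row.set (j+1) (pvGet2 (g0 :: gs) i j)) row
            (List.range g0.length))
          (gs.length + 1) (List.replicate (g0.length + 2) (0:Int))
          (List.replicate (g0.length + 2) (0:Int))
          (List.replicate (gs.length + 1) (List.replicate (g0.length + 2) (0:Int))) (by simp),
        pv_mapIdx_replicate]
    have hmap1 : (fun i => List.foldl (fun row j => row.set (j+1) (pvGet2 (g0 :: gs) i j))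
          (List.replicate (g0.length + 2) (0:Int)) (List.range g0.length))
        = (fun i => 0 :: ((List.range g0.length).map (fun j => pvGet2 (g0 :: gs) i j) ++ [0])) := by
      funext i
      exact hrow (fun j => pvGet2 (g0 :: gs) i j)
    rw [hmap1]
    -- ===== pass 2: top and bottom border rows =====
    rw [pv_foldl_topbot (fun j => pvGet2 (g0 :: gs) 0 j) (fun j => pvGet2 (g0 :: gs) gs.length j)
          (gs.length + 1) (List.range g0.length)
          (List.replicate (g0.length + 2) (0:Int)) (List.replicate (g0.length + 2) (0:Int))
          ((List.range (gs.length + 1)).map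
            (fun i => 0 :: ((List.range g0.length).map (fun j => pvGet2 (g0 :: gs) i j) ++ [0])))
          (by simp),
        hrow (fun j => pvGet2 (g0 :: gs) 0 j), hrow (fun j => pvGet2 (g0 :: gs) gs.length j)]
    -- ===== pass 3: left and right border columns =====
    have hf3 : (fun (o : List (List Int)) (i : Nat) =>
          pvSet2 (pvSet2 o (i + 1) 0 (pvGet2 (g0 :: gs) i 0)) (i + 1) (g0.length + 1)
            (pvGet2 (g0 :: gs) i (g0.length - 1)))
        = (fun o i => o.set (i+1)
            (((o.getD (i+1) []).set 0 (pvGet2 (g0 :: gs) i 0)).set (g0.length + 1)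
              (pvGet2 (g0 :: gs) i (g0.length - 1)))) := by
      funext o i
      exact pv_pvSet2_pvSet2_same o (i+1) 0 (g0.length + 1) _ _
    rw [hf3,
        pv_foldl_rows ([] : List Int)
          (fun i row => ((row.set 0 (pvGet2 (g0 :: gs) i 0)).set (g0.length + 1)
            (pvGet2 (g0 :: gs) i (g0.length - 1))))
          (gs.length + 1)
          (0 :: ((List.range g0.length).map (fun j => pvGet2 (g0 :: gs) 0 j) ++ [0]))
          (0 :: ((List.range g0.length).map (fun j => pvGet2 (g0 :: gs) gs.length j) ++ [0]))
          ((List.range (gs.length + 1)).map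
            (fun i => 0 :: ((List.range g0.length).map (fun j => pvGet2 (g0 :: gs) i j) ++ [0])))
          (by simp),
        pv_mapIdx_map_range]
    -- ===== final matching with the canonical form =====
    unfold Pre_transform at hpre
    simp only [List.headD_cons] at hpre
    have hrowfix : (fun i => ((0 :: (List.map (fun j => pvGet2 (g0 :: gs) i j)
            (List.range g0.length) ++ [0])).set 0 (pvGet2 (g0 :: gs) i 0)).set (g0.length + 1)
            (pvGet2 (g0 :: gs) i (g0.length - 1)))
        = (fun i => pvGet2 (g0 :: gs) i 0 ::
            (List.map (fun j => pvGet2 (g0 :: gs) i j) (List.range g0.length)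
              ++ [pvGet2 (g0 :: gs) i (g0.length - 1)])) := by
      funext i
      rw [List.set_cons_zero,
          show (pvGet2 (g0 :: gs) i 0 ::
              (List.map (fun j => pvGet2 (g0 :: gs) i j) (List.range g0.length) ++ [(0:Int)]))
            = (pvGet2 (g0 :: gs) i 0 ::
              List.map (fun j => pvGet2 (g0 :: gs) i j) (List.range g0.length)) ++ [(0:Int)] from by
            simp,
          show g0.length + 1 = (pvGet2 (g0 :: gs) i 0 ::
              List.map (fun j => pvGet2 (g0 :: gs) i j) (List.range g0.length)).length from by simp,
          pv_set_append_last]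
      simp
    rw [hrowfix]
    simp only [pvGet2, List.getD_cons_zero]
    have hmid := pv_map_range_getD
      (fun row => row.getD 0 0 :: (List.map (fun j => row.getD j 0) (List.range g0.length)
        ++ [row.getD (g0.length - 1) 0])) ([] : List Int) (g0 :: gs)
    simp only [List.length_cons] at hmid
    rw [hmid]
    congr 1
    · -- top border row
      rw [pv_map_getD_range g0 g0.length le_rfl]
      simp [pvPad]
    congr 1
    · -- middle rows
      refine List.map_congr_left (fun row hrowmem => ?_)
      rw [pv_getD_zero_headD, pv_map_getD_range row g0.length (hpre row hrowmem)]
      simp [pvPad]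
    · -- bottom border row
      rw [pv_getLastD_cons g0 gs ([] : List Int),
          pv_map_getD_range ((g0 :: gs).getD gs.length []) g0.length
            (hpre _ (by
              rw [List.getD_eq_getElem _ _ (by simp)]
              exact List.getElem_mem _))]
      simp [pvPad]

-- B reduced to the canonical row form
lemma pv_alt_eq_canon (grid : List (List Int)) (hpre : Pre_transform grid) :
    transform_alt grid = pvCanon grid := by
  by_cases hg : grid = [] ∨ grid.headD [] = []
  · simp only [transform_alt, pvCanon, if_pos hg]
  · obtain ⟨g0, gs, rfl⟩ : ∃ g0 gs, grid = g0 :: gs := by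
      cases grid with
      | nil => exact absurd (Or.inl rfl) hg
      | cons a l => exact ⟨a, l, rfl⟩
    have hc0 : g0 ≠ [] := fun h => hg (Or.inr (by simp [h]))
    have hcpos : 1 ≤ g0.length := List.length_pos_iff.mpr hc0
    simp only [transform_alt, pvCanon]
    rw [if_neg hg, if_neg hg]
    simp only [List.headD_cons, List.length_cons]
    unfold Pre_transform at hpre
    simp only [List.headD_cons] at hpre
    rw [pv_map_range_two]
    congr 1
    · -- top row: i = 0
      rw [pv_map_range_two]
      have hmid : (List.range g0.length).map (fun k =>
            if ((0:Nat) = 0 ∨ (0:Nat) = gs.length + 1 + 1) ∧ (k+1 = 0 ∨ k+1 = g0.length + 1)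
            then (0:Int)
            else (((g0::gs).getD (min (max (0-1) 0) (gs.length + 1 - 1)) []).getD
              (min (max (k+1-1) 0) (g0.length - 1)) 0))
          = (List.range g0.length).map (fun k => g0.getD k 0) := by
        refine List.map_congr_left (fun k hk => ?_)
        have hkc : k < g0.length := List.mem_range.mp hk
        rw [if_neg (by omega),
            show min (max ((0:Nat)-1) 0) (gs.length + 1 - 1) = 0 from by omega,
            show min (max (k+1-1) 0) (g0.length - 1) = k from by omega]
        simp
      rw [hmid, pv_map_getD_range g0 g0.length le_rfl]
      simp only [pvPad]
      simp
    congr 1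
    · -- middle rows: i = ih + 1 with ih < r
      have hmid : (List.range (gs.length + 1)).map (fun ih =>
            (List.range (g0.length + 2)).map (fun j =>
              if (ih+1 = 0 ∨ ih+1 = gs.length + 1 + 1) ∧ (j = 0 ∨ j = g0.length + 1)
              then (0:Int)
              else (((g0::gs).getD (min (max (ih+1-1) 0) (gs.length + 1 - 1)) []).getD
                (min (max (j-1) 0) (g0.length - 1)) 0)))
          = (List.range (gs.length + 1)).map (fun ih =>
              pvPad g0.length (((g0::gs).getD ih []).headD 0) ((g0::gs).getD ih [])
                (((g0::gs).getD ih []).getD (g0.length - 1) 0)) := by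
        refine List.map_congr_left (fun ih hih => ?_)
        have hir : ih < gs.length + 1 := List.mem_range.mp hih
        have hrowmem : (g0::gs).getD ih [] ∈ (g0::gs) := by
          rw [List.getD_eq_getElem _ _ (by simpa using hir)]
          exact List.getElem_mem _
        have hrl : g0.length ≤ ((g0::gs).getD ih []).length := hpre _ hrowmem
        rw [pv_map_range_two]
        have hidx : min (max (ih+1-1) 0) (gs.length + 1 - 1) = ih := by omega
        have hinterior : (List.range g0.length).map (fun k =>
              if (ih+1 = 0 ∨ ih+1 = gs.length + 1 + 1) ∧ (k+1 = 0 ∨ k+1 = g0.length + 1)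
              then (0:Int)
              else (((g0::gs).getD (min (max (ih+1-1) 0) (gs.length + 1 - 1)) []).getD
                (min (max (k+1-1) 0) (g0.length - 1)) 0))
            = (List.range g0.length).map (fun k => ((g0::gs).getD ih []).getD k 0) := by
          refine List.map_congr_left (fun k hk => ?_)
          have hkc : k < g0.length := List.mem_range.mp hk
          rw [if_neg (by omega), hidx, show min (max (k+1-1) 0) (g0.length - 1) = k by omega]
        rw [hinterior, pv_map_getD_range _ g0.length hrl]
        simp only [pvPad]
        rw [if_neg (by omega), if_neg (by omega), hidx,
            show min (max (0-1) 0) (g0.length - 1) = 0 by omega,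
            show min (max (g0.length+1-1) 0) (g0.length - 1) = g0.length - 1 by omega,
            pv_getD_zero_headD]
      rw [hmid]
      have h2 := pv_map_range_getD
        (fun row => pvPad g0.length (row.headD 0) row (row.getD (g0.length - 1) 0))
        ([] : List Int) (g0 :: gs)
      simp only [List.length_cons] at h2
      rw [h2]
    · -- bottom row: i = r + 1
      rw [pv_map_range_two]
      have hbl : g0.length ≤ ((g0::gs).getD gs.length []).length := by
        apply hpre
        rw [List.getD_eq_getElem _ _ (by simp)]
        exact List.getElem_mem _
      have hinterior : (List.range g0.length).map (fun k =>
            if (gs.length+1+1 = 0 ∨ gs.length+1+1 = gs.length + 1 + 1) ∧ (k+1 = 0 ∨ k+1 = g0.length + 1)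
            then (0:Int)
            else (((g0::gs).getD (min (max (gs.length+1+1-1) 0) (gs.length + 1 - 1)) []).getD
              (min (max (k+1-1) 0) (g0.length - 1)) 0))
          = (List.range g0.length).map (fun k => ((g0::gs).getD gs.length []).getD k 0) := by
        refine List.map_congr_left (fun k hk => ?_)
        have hkc : k < g0.length := List.mem_range.mp hk
        rw [if_neg (by omega),
            show min (max (gs.length+1+1-1) 0) (gs.length + 1 - 1) = gs.length by omega,
            show min (max (k+1-1) 0) (g0.length - 1) = k by omega]
      rw [hinterior, pv_map_getD_range _ g0.length hbl]
      simp only [pvPad]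
      rw [pv_getLastD_cons g0 gs ([] : List Int)]
      simp

-- ===== VERDICT (by name: the statement is the Claim_ definition above) =====
theorem transform_spec : Claim_equal_transform := by
  intro grid _ hpre
  unfold Spec_transform
  rw [pv_transform_eq_canon grid hpre, pv_alt_eq_canon grid hpre]
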